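-- pv_equiv track=rewrite | github.com/PackeTsar/autoshell | autoshell/connectors/cli.py | _order_credentials
-- ===== SOURCE A (Python) =====
-- def _order_credentials(credentials, type_order):
--     """
--     connectors.cli._order_credentials builds a host-specific list of
--     credentials to try to attempt to log into the host. The credentials are
--     ordered based on whether or not they are typed, if that type is in the
--     provided type order, and where in that order the type exists. This helps
--     the cli connector more effeciently determine the appropriate credential
--     to log in to the host.
--     """
--     ordered = {}  # Credentials with an ordered type: highest pref
--     unordered_untyped = []  # Credentials with an ordered type: middle pref
--     unordered_typed = []  # Credentials with an ordered type: lowest pref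
--     for credential in credentials:
--         if credential["type"]:  # If there is a type in the credential
--             # And that type is in the provided ordered types
--             if credential["type"] in type_order:
--                 # And that credential has not been added to the ordered dict
--                 if credential["type"] not in ordered:
--                     # Start a new dict with that credential in it
--                     ordered.update({credential["type"]: [credential]})
--                 else:
--                     # Add that credential to that keyed list
--                     ordered[credential["type"]].append(credential)
--             else:  # If the type was not in type_order
--                 unordered_typed.append(credential)
--         else:  # If the credential had no type
--             unordered_untyped.append(credential)
--     # Build a deduplicated copy of the type_order list so we don't accidently
--     #  add the same credential to the final result multiple times
--     type_order_dedup = []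
--     for ctype in type_order:
--         if ctype not in type_order_dedup:
--             type_order_dedup.append(ctype)
--     result = []
--     # Add ordered and typed credentials to the result first, in the order of
--     #  the type_order provided
--     for ctype in type_order_dedup:
--         # If we had any credentials with that type
--         if ctype in ordered:
--             result += ordered[ctype]
--     # Middle preference is unordered and untype credentials
--     result += unordered_untyped
--     # Last preference is unordered credentials which are typed
--     result += unordered_typed
--     return result
-- ===== SOURCE B (Python) =====
-- def _order_credentials(credentials, type_order):
--     def ty(c):
--         return c["type"]
--     order = list(dict.fromkeys(type_order))
--     typed_ordered = [c for t in order if t for c in credentials if ty(c) == t]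
--     untyped = [c for c in credentials if not ty(c)]
--     typed_unordered = [c for c in credentials if ty(c) and ty(c) not in type_order]
--     return typed_ordered + untyped + typed_unordered
-- ===== Notes on version B (the rewrite author's own statement) =====
-- stated objective: alternative
-- what changed: A buckets credentials in one pass into a type-keyed dict plus two overflow lists and then replays the deduplicated type order; B builds each preference tier directly with filter comprehensions over the credential list (per ordered type, untyped, typed-but-unordered) and concatenates them.
import Mathlib
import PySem

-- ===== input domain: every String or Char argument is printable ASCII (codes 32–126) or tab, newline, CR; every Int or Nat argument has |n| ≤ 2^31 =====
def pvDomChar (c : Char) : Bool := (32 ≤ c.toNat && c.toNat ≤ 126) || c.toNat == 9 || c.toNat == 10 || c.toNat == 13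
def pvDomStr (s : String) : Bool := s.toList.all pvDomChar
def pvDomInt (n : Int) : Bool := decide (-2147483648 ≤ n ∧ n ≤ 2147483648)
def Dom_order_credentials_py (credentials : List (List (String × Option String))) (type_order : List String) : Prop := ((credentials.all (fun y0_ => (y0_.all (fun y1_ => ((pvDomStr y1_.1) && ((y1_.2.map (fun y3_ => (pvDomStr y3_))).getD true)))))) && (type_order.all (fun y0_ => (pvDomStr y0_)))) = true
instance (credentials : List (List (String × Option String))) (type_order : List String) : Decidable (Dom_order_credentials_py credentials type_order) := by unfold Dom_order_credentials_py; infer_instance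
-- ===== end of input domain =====

-- B replaces A's one-pass dict bucketing with per-tier filter comprehensions over the
-- credential list (a different decomposition of the same ordering; similar cost, not faster).

-- credential["type"]: first-match lookup; a missing "type" key is a KeyError in Python,
-- excluded by Pre_ below (the .getD none default is never reached inside Pre_).
def pvCredType (c : List (String × Option String)) : Option String :=
  ((PySem.Dict.mk c).get? "type").getD none

-- Python truthiness of an Optional[str] value: None and "" are falsy.
def pvTruthy : Option String → Bool
  | none => false
  | some s => !(s == "")

-- ===== PORT A =====
def order_credentials_py (credentials : List (List (String × Option String))) (type_order : List String) : List (List (String × Option String)) :=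
  let st := credentials.foldl
    (fun (st : PySem.Dict String (List (List (String × Option String))) × List (List (String × Option String)) × List (List (String × Option String))) c =>
      match pvCredType c with
      | some ts =>
        if ts == "" then (st.1, st.2.1 ++ [c], st.2.2)   -- falsy type: untyped tier
        else if type_order.contains ts then
          if st.1.contains ts = false then (st.1.insert ts [c], st.2.1, st.2.2)
          else (st.1.modify ts [] (fun l => l ++ [c]), st.2.1, st.2.2)
        else (st.1, st.2.1, st.2.2 ++ [c])
      | none => (st.1, st.2.1 ++ [c], st.2.2))
    (PySem.Dict.empty, [], [])
  let type_order_dedup := type_order.foldl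
    (fun acc ctype => if acc.contains ctype then acc else acc ++ [ctype]) []
  let result := type_order_dedup.foldl
    (fun r ctype => if st.1.contains ctype then r ++ st.1.getD ctype [] else r) []
  result ++ st.2.1 ++ st.2.2

-- ===== PORT B =====
def order_credentials_py_alt (credentials : List (List (String × Option String))) (type_order : List String) : List (List (String × Option String)) :=
  ((PySem.List.dedup type_order).flatMap (fun t =>
    if t == "" then [] else credentials.filter (fun c => pvCredType c == some t)))
  ++ credentials.filter (fun c => !pvTruthy (pvCredType c))
  ++ credentials.filter (fun c =>
      match pvCredType c with
      | some ts => !(ts == "") && !(type_order.contains ts)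
      | none => false)

-- ===== PRECONDITION & SPEC =====
-- Pre_ excludes exactly the credentials dicts without a "type" key, on which Python A raises KeyError.
def Pre_order_credentials_py (credentials : List (List (String × Option String))) (type_order : List String) : Prop :=
  credentials.all (fun c => ((PySem.Dict.mk c).get? "type").isSome) = true
instance (credentials : List (List (String × Option String))) (type_order : List String) : Decidable (Pre_order_credentials_py credentials type_order) := by unfold Pre_order_credentials_py; infer_instance

def pvWitness_order_credentials_py : (List (List (String × Option String))) × List String :=
  ([[("type", some "a")], [("type", none)]], ["a", "b"])

def Spec_order_credentials_py (credentials : List (List (String × Option String))) (type_order : List String) (out : List (List (String × Option String))) : Prop := out = order_credentials_py_alt credentials type_order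
instance (credentials : List (List (String × Option String))) (type_order : List String) (out : List (List (String × Option String))) : Decidable (Spec_order_credentials_py credentials type_order out) := by unfold Spec_order_credentials_py; infer_instance

-- ===== CLAIM (what is proved, stated in full; the proofs are below) =====
def Claim_equal_order_credentials_py : Prop := ∀ (credentials : List (List (String × Option String))) (type_order : List String), Dom_order_credentials_py credentials type_order → Pre_order_credentials_py credentials type_order → Spec_order_credentials_py credentials type_order (order_credentials_py credentials type_order)

-- ===== LEMMAS AND PROOFS =====

-- A's per-credential loop body, named so the loop lemmas below can speak about it.
def pvStepA (type_order : List String)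
    (st : PySem.Dict String (List (List (String × Option String))) × List (List (String × Option String)) × List (List (String × Option String)))
    (c : List (String × Option String)) :
    PySem.Dict String (List (List (String × Option String))) × List (List (String × Option String)) × List (List (String × Option String)) :=
  match pvCredType c with
  | some ts =>
    if ts == "" then (st.1, st.2.1 ++ [c], st.2.2)
    else if type_order.contains ts then
      if st.1.contains ts = false then (st.1.insert ts [c], st.2.1, st.2.2)
      else (st.1.modify ts [] (fun l => l ++ [c]), st.2.1, st.2.2)
    else (st.1, st.2.1, st.2.2 ++ [c])
  | none => (st.1, st.2.1 ++ [c], st.2.2)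

-- per-type bucket of B: the credentials of (truthy) type t, in original order
def pvBucket (credentials : List (List (String × Option String))) (t : String) : List (List (String × Option String)) :=
  if t == "" then [] else credentials.filter (fun c => pvCredType c == some t)

lemma loop_uu (tord : List String) :
    ∀ (creds : List (List (String × Option String))) d uu ut,
      (creds.foldl (pvStepA tord) (d, uu, ut)).2.1 = uu ++ creds.filter (fun c => !pvTruthy (pvCredType c)) := by
  intro creds
  induction creds with
  | nil => simp
  | cons c rest ih =>
    intro d uu ut
    simp only [List.foldl_cons, List.filter_cons]
    cases h : pvCredType c with
    | none => simp [pvStepA, h, ih, pvTruthy]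
    | some ts =>
      by_cases hts : ts = ""
      · simp [pvStepA, h, hts, ih, pvTruthy]
      · have hb : (ts == "") = false := by simp [hts]
        by_cases hin : ts ∈ tord
        · by_cases hc : d.contains ts = false
          · simp [pvStepA, h, hb, hin, hc, ih, pvTruthy]
          · simp [pvStepA, h, hb, hin, hc, ih, pvTruthy]
        · simp [pvStepA, h, hb, hin, ih, pvTruthy]

lemma loop_ut (tord : List String) :
    ∀ (creds : List (List (String × Option String))) d uu ut,
      (creds.foldl (pvStepA tord) (d, uu, ut)).2.2 = ut ++ creds.filter (fun c =>
        match pvCredType c with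
        | some ts => !(ts == "") && !(tord.contains ts)
        | none => false) := by
  intro creds
  induction creds with
  | nil => simp
  | cons c rest ih =>
    intro d uu ut
    simp only [List.foldl_cons, List.filter_cons]
    cases h : pvCredType c with
    | none => simp [pvStepA, h, ih]
    | some ts =>
      by_cases hts : ts = ""
      · simp [pvStepA, h, hts, ih]
      · have hb : (ts == "") = false := by simp [hts]
        by_cases hin : ts ∈ tord
        · by_cases hc : d.contains ts = false
          · simp [pvStepA, h, hb, hin, hc, ih]
          · simp [pvStepA, h, hb, hin, hc, ih]
        · simp [pvStepA, h, hb, hin, ih, Bool.not_eq_true] 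

lemma loop_bucket (tord : List String) (t : String) (ht : tord.contains t = true) :
    ∀ (creds : List (List (String × Option String))) d uu ut,
      (creds.foldl (pvStepA tord) (d, uu, ut)).1.getD t [] = d.getD t [] ++ pvBucket creds t := by
  intro creds
  induction creds with
  | nil => simp [pvBucket]
  | cons c rest ih =>
    intro d uu ut
    simp only [List.foldl_cons]
    cases h : pvCredType c with
    | none =>
      simp only [pvStepA, h]
      rw [ih]
      by_cases htt0 : t = ""
      · simp [pvBucket, htt0]
      · simp [pvBucket, htt0, List.filter_cons, h]
    | some ts =>
      by_cases hts : ts = ""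
      · subst hts
        simp only [pvStepA, h, beq_self_eq_true, if_pos rfl]
        rw [ih]
        by_cases htt : t = ""
        · simp [pvBucket, htt]
        · simp [pvBucket, htt, List.filter_cons, h]
      · have hb : (ts == "") = false := by simp [hts]
        by_cases hin : ts ∈ tord
        · have hin2 : tord.contains ts = true := List.elem_eq_true_of_mem hin
          by_cases hc : d.contains ts = false
          · simp only [pvStepA, h, hb, hin2, hc, Bool.false_eq_true, Bool.true_eq_false, if_false, if_true, Bool.false_eq_true, if_false, if_true, reduceIte]
            rw [ih]
            by_cases htt : t = ts
            · subst htt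
              have h0 : d.getD t [] = [] := by
                have := (PySem.Dict.get?_eq_none_iff_contains d t).2 (by simpa using hc)
                simp [PySem.Dict.getD, this]
              rw [PySem.Dict.getD_insert]
              simp [h0, pvBucket, hts, List.filter_cons, h]
            · rw [PySem.Dict.getD_insert]
              simp only [if_neg htt]
              by_cases htt0 : t = ""
              · simp [pvBucket, htt0]
              · simp [pvBucket, htt0, List.filter_cons, h]
                intro he; exact absurd he.symm htt
          · have hc2 : d.contains ts = true := by simpa using hc
            simp only [pvStepA, h, hb, hin2, hc2, Bool.false_eq_true, Bool.true_eq_false, if_false, if_true, reduceIte]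
            rw [ih]
            by_cases htt : t = ts
            · subst htt
              rw [PySem.Dict.getD_modify]
              simp [pvBucket, hts, List.filter_cons, h]
            · rw [PySem.Dict.getD_modify]
              simp only [if_neg htt]
              by_cases htt0 : t = ""
              · simp [pvBucket, htt0]
              · simp [pvBucket, htt0, List.filter_cons, h]
                intro he; exact absurd he.symm htt
        · have hin2 : tord.contains ts = false := by simpa using hin
          simp only [pvStepA, h, hb, hin2, reduceIte]
          rw [ih]
          by_cases htt0 : t = ""
          · simp [pvBucket, htt0]
          · simp [pvBucket, htt0, List.filter_cons, h]
            intro he; subst he; exact absurd (List.mem_of_elem_eq_true ht) hin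

lemma loop_contains (tord : List String) (t : String) (ht : tord.contains t = true) :
    ∀ (creds : List (List (String × Option String))) d uu ut,
      (creds.foldl (pvStepA tord) (d, uu, ut)).1.contains t
        = (d.contains t || !(pvBucket creds t).isEmpty) := by
  intro creds
  induction creds with
  | nil => simp [pvBucket]
  | cons c rest ih =>
    intro d uu ut
    simp only [List.foldl_cons]
    cases h : pvCredType c with
    | none =>
      simp only [pvStepA, h]
      rw [ih]
      by_cases htt0 : t = ""
      · simp [pvBucket, htt0]
      · simp [pvBucket, htt0, List.filter_cons, h]
    | some ts =>
      by_cases hts : ts = ""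
      · subst hts
        simp only [pvStepA, h, beq_self_eq_true, if_pos rfl]
        rw [ih]
        by_cases htt0 : t = ""
        · simp [pvBucket, htt0]
        · simp [pvBucket, htt0, List.filter_cons, h]
      · have hb : (ts == "") = false := by simp [hts]
        by_cases hin : ts ∈ tord
        · have hin2 : tord.contains ts = true := List.elem_eq_true_of_mem hin
          by_cases hc : d.contains ts = false
          · simp only [pvStepA, h, hb, hin2, hc, Bool.false_eq_true, Bool.true_eq_false, if_false, if_true, Bool.false_eq_true, reduceIte]
            rw [ih, PySem.Dict.contains_insert]
            by_cases htt : t = ts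
            · subst htt
              simp [pvBucket, hts, List.filter_cons, h]
            · have : (t == ts) = false := by simp [htt]
              simp only [this, Bool.false_or]
              by_cases htt0 : t = ""
              · simp [pvBucket, htt0]
              · simp [pvBucket, htt0, List.filter_cons, h]
                rw [if_neg (fun he => htt he.symm)]
          · have hc2 : d.contains ts = true := by simpa using hc
            simp only [pvStepA, h, hb, hin2, hc2, Bool.false_eq_true, Bool.true_eq_false, if_false, if_true, reduceIte]
            rw [ih, PySem.Dict.contains_modify]
            by_cases htt : t = ts
            · subst htt
              have : d.contains t = true := by simpa using hc
              simp [this]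
            · have hne : (t == ts) = false := by simp [htt]
              simp only [hne, Bool.false_or]
              by_cases htt0 : t = ""
              · simp [pvBucket, htt0]
              · simp [pvBucket, htt0, List.filter_cons, h]
                rw [if_neg (fun he => htt he.symm)]
        · have hin2 : tord.contains ts = false := by simpa using hin
          simp only [pvStepA, h, hb, hin2, reduceIte]
          rw [ih]
          by_cases htt0 : t = ""
          · simp [pvBucket, htt0]
          · simp [pvBucket, htt0, List.filter_cons, h]
            rw [if_neg (fun he => hin (by rw [he]; exact List.mem_of_elem_eq_true ht))]

-- ===== VERDICT (by name: the statement is the Claim_ definition above) =====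
theorem order_credentials_py_spec : Claim_equal_order_credentials_py := by
  intro credentials type_order _ _
  unfold Spec_order_credentials_py order_credentials_py order_credentials_py_alt
  have hded : (type_order.foldl (fun acc ctype => if acc.contains ctype then acc else acc ++ [ctype]) []) = PySem.List.dedup type_order := rfl
  have hfold : credentials.foldl
      (fun (st : PySem.Dict String (List (List (String × Option String))) × List (List (String × Option String)) × List (List (String × Option String))) c =>
        match pvCredType c with
        | some ts =>
          if ts == "" then (st.1, st.2.1 ++ [c], st.2.2)
          else if type_order.contains ts then
            if st.1.contains ts = false then (st.1.insert ts [c], st.2.1, st.2.2)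
            else (st.1.modify ts [] (fun l => l ++ [c]), st.2.1, st.2.2)
          else (st.1, st.2.1, st.2.2 ++ [c])
        | none => (st.1, st.2.1 ++ [c], st.2.2))
      (PySem.Dict.empty, [], [])
      = credentials.foldl (pvStepA type_order) (PySem.Dict.empty, [], []) := rfl
  simp only [hfold, hded]
  rw [loop_uu, loop_ut]
  have hres : (PySem.List.dedup type_order).foldl
      (fun r ctype => if (credentials.foldl (pvStepA type_order) (PySem.Dict.empty, [], [])).1.contains ctype then r ++ (credentials.foldl (pvStepA type_order) (PySem.Dict.empty, [], [])).1.getD ctype [] else r) []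
      = (PySem.List.dedup type_order).foldl (fun r t => r ++ pvBucket credentials t) [] := by
    apply PySem.List.foldl_congr_mem
    intro acc x hx
    have hxto : type_order.contains x = true := by
      have : x ∈ type_order := (PySem.List.mem_dedup type_order x).1 hx
      exact List.elem_eq_true_of_mem this
    rw [loop_contains type_order x hxto, loop_bucket type_order x hxto]
    simp only [PySem.Dict.contains_empty, PySem.Dict.getD_empty, Bool.false_or, List.nil_append]
    by_cases he : (pvBucket credentials x).isEmpty = true
    · simp [he, List.isEmpty_iff.1 he]
    · simp [he]
  rw [hres, PySem.List.foldl_append_eq_flatMap]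
  simp only [List.nil_append, List.append_assoc]
  have hfun : pvBucket credentials
      = (fun t => if t == "" then [] else List.filter (fun c => pvCredType c == some t) credentials) := by
    funext t; rfl
  rw [hfun]
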